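-- pv_equiv track=rewrite | github.com/BianchiniLuca/pythagorean-inverse-system-135 | src/pythagorean_inverse_system_135/canon.py | slice_bigrams
-- ===== SOURCE A (Python) =====
-- from typing import List, Optional, Sequence, Set, Tuple
--
-- Symbol = int
--
-- Bigram = Tuple[Symbol, Symbol]
--
-- def cyclic_bigrams(seq: Sequence[Symbol]) -> List[Bigram]:
--     """Return the list of cyclic bigrams for seq (includes last->first)."""
--     L = len(seq)
--     return [(seq[i], seq[(i + 1) % L]) for i in range(L)]
--
-- def slice_bigrams(seq: Sequence[Symbol], n_voices: int, d: int = 1) -> List[List[Bigram]]: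
--     """
--     For each time index i (bigram index), compute the list of bigrams heard by each voice:
--       voice k uses bigram at index (i - k*d) mod L
--     where L = len(seq) = number of cyclic bigrams.
--     """
--     if n_voices < 1:
--         raise ValueError("n_voices must be >= 1")
--     if d < 1:
--         raise ValueError("d must be >= 1")
--
--     L = len(seq)
--     bgs = cyclic_bigrams(seq)
--     slices: List[List[Bigram]] = []
--     for i in range(L):
--         current: List[Bigram] = []
--         for k in range(n_voices):
--             idx = (i - k * d) % L
--             current.append(bgs[idx])
--         slices.append(current)
--     return slices
-- ===== SOURCE B (Python) =====
-- from typing import List, Sequence, Tuple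
--
-- Symbol = int
-- Bigram = Tuple[Symbol, Symbol]
--
-- def cyclic_bigrams(seq: Sequence[Symbol]) -> List[Bigram]:
--     L = len(seq)
--     return [(seq[i], seq[(i + 1) % L]) for i in range(L)]
--
-- def slice_bigrams(seq: Sequence[Symbol], n_voices: int, d: int = 1) -> List[List[Bigram]]:
--     if n_voices < 1:
--         raise ValueError("n_voices must be >= 1")
--     if d < 1:
--         raise ValueError("d must be >= 1")
--     bgs = cyclic_bigrams(seq)
--     L = len(bgs)
--     if L == 0:
--         return []
--     voices = []
--     for k in range(n_voices):
--         off = (k * d) % L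
--         voices.append(bgs if off == 0 else bgs[-off:] + bgs[:-off])
--     return [list(col) for col in zip(*voices)]
-- ===== Notes on version B (the rewrite author's own statement) =====
-- stated objective: alternative
-- what changed: Instead of per-time per-voice modular indexing in nested loops, B builds each voice's whole rotated bigram sequence once by list slicing and then transposes the voices with zip(*voices).
import Mathlib
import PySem

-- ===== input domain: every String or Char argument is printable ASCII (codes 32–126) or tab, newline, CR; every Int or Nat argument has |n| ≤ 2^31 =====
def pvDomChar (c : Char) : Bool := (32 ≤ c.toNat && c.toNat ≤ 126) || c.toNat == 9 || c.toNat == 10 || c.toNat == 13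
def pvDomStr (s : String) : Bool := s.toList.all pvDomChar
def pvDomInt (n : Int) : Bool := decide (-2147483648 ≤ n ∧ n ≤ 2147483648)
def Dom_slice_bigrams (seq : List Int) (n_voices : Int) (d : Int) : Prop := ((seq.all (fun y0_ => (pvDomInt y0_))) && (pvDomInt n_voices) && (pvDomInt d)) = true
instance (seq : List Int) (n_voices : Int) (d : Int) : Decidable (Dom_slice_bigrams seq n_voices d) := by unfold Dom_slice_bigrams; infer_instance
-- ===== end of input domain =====

-- B replaces the per-time, per-voice modular indexing of A by building each voice's
-- whole rotated bigram sequence once (slicing) and transposing with zip(*voices): alternative decomposition, same cost.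


-- ===== PORT A =====
-- cyclic_bigrams: the comprehension [(seq[i], seq[(i+1)%L]) for i in range(L)]
def cyclic_bigrams_port (seq : List Int) : List (Int × Int) :=
  let L : Int := seq.length
  (PySem.List.pyRange 0 L 1).map (fun i =>
    (PySem.List.pyGetD seq i 0, PySem.List.pyGetD seq (PySem.Int.mod (i + 1) L) 0))

def slice_bigrams (seq : List Int) (n_voices : Int) (d : Int) : List (List (Int × Int)) :=
  let L : Int := seq.length
  let bgs := cyclic_bigrams_port seq
  (PySem.List.pyRange 0 L 1).foldl (fun slices i =>
    slices ++ [(PySem.List.pyRange 0 n_voices 1).foldl (fun current k =>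
      current ++ [PySem.List.pyGetD bgs (PySem.Int.mod (i - k * d) L) (0, 0)]) []]) []

-- ===== PORT B =====
-- hand-written port of zip(*rows) followed by list(col): columns up to the shortest row
-- (exact: zip stops at the shortest input; empty rows-list gives zip() = []).
def zipStarCols (rows : List (List (Int × Int))) : List (List (Int × Int)) :=
  match rows with
  | [] => []
  | r :: rs =>
    let m := rs.foldl (fun acc row => Nat.min acc row.length) r.length
    (List.range m).map (fun i => (r :: rs).map (fun row => row.getD i (0, 0)))

def slice_bigrams_alt (seq : List Int) (n_voices : Int) (d : Int) : List (List (Int × Int)) :=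
  let bgs := cyclic_bigrams_port seq
  let L : Int := bgs.length
  if L == 0 then []
  else
    let voices := (PySem.List.pyRange 0 n_voices 1).foldl (fun acc k =>
      let off := PySem.Int.mod (k * d) L
      acc ++ [if off == 0 then bgs
              else PySem.List.slice bgs (some (-off)) none ++ PySem.List.slice bgs none (some (-off))]) []
    zipStarCols voices

-- ===== PRECONDITION & SPEC =====
-- A raises ValueError when n_voices < 1 or d < 1; Pre_ excludes exactly those inputs.
def Pre_slice_bigrams (seq : List Int) (n_voices : Int) (d : Int) : Prop :=
  1 ≤ n_voices ∧ 1 ≤ d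
instance (seq : List Int) (n_voices : Int) (d : Int) : Decidable (Pre_slice_bigrams seq n_voices d) := by unfold Pre_slice_bigrams; infer_instance
def pvWitness_slice_bigrams : List Int × Int × Int := ([3, 1, 2], 2, 1)

def Spec_slice_bigrams (seq : List Int) (n_voices : Int) (d : Int) (out : List (List (Int × Int))) : Prop := out = slice_bigrams_alt seq n_voices d
instance (seq : List Int) (n_voices : Int) (d : Int) (out : List (List (Int × Int))) : Decidable (Spec_slice_bigrams seq n_voices d out) := by unfold Spec_slice_bigrams; infer_instance

-- ===== CLAIM (what is proved, stated in full; the proofs are below) =====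
def Claim_equal_slice_bigrams : Prop := ∀ (seq : List Int) (n_voices : Int) (d : Int), Dom_slice_bigrams seq n_voices d → Pre_slice_bigrams seq n_voices d → Spec_slice_bigrams seq n_voices d (slice_bigrams seq n_voices d)

-- ===== LEMMAS AND PROOFS =====

theorem len_cyclic_bigrams (seq : List Int) :
    (cyclic_bigrams_port seq).length = seq.length := by
  simp [cyclic_bigrams_port, PySem.List.length_pyRange_one]

-- the foldl of min over rows of constant length a starting at a stays a
theorem foldl_min_const (rows : List (List (Int × Int))) (a : Nat)
    (h : ∀ r ∈ rows, r.length = a) :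
    rows.foldl (fun acc row => Nat.min acc row.length) a = a := by
  induction rows with
  | nil => rfl
  | cons r rs ih =>
    have hr := h r (by simp)
    simp only [List.foldl_cons, hr, Nat.min_self]
    exact ih (fun x hx => h x (by simp [hx]))

-- rotation of bgs by o ∈ [1, L): its element i equals bgs at (i - o) mod L
theorem rot_getD (bgs : List (Int × Int)) (o : Nat) (i : Nat)
    (ho0 : 0 < o) (hoL : o < bgs.length) (hi : i < bgs.length) :
    (bgs.drop (bgs.length - o) ++ bgs.take (bgs.length - o)).getD i (0, 0)
      = bgs.getD ((((i : Int) - (o : Int)) % (bgs.length : Int)).toNat) (0, 0) := by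
  have hdlen : (bgs.drop (bgs.length - o)).length = o := by simp; omega
  by_cases hio : i < o
  · have heq : ((i : Int) - (o : Int)) % (bgs.length : Int)
        = (i : Int) - (o : Int) + (bgs.length : Int) := by
      have h1 := Int.add_mul_emod_self_left ((i : Int) - (o : Int)) ((bgs.length : Int)) 1
      rw [mul_one] at h1
      rw [← h1]
      exact Int.emod_eq_of_lt (by omega) (by omega)
    have htn : ((((i : Int) - (o : Int)) % (bgs.length : Int))).toNat
        = bgs.length - o + i := by omega
    rw [htn, List.getD_eq_getElem?_getD, List.getD_eq_getElem?_getD,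
        List.getElem?_append_left (by omega), List.getElem?_drop]
  · have heq : ((i : Int) - (o : Int)) % (bgs.length : Int) = (i : Int) - (o : Int) :=
      Int.emod_eq_of_lt (by omega) (by omega)
    have htn : ((((i : Int) - (o : Int)) % (bgs.length : Int))).toNat = i - o := by omega
    rw [htn, List.getD_eq_getElem?_getD, List.getD_eq_getElem?_getD,
        List.getElem?_append_right (by omega), hdlen, List.getElem?_take]
    rw [if_pos (by omega)]

-- core pointwise fact: voice k's rotated row at time i equals A's modular lookup
theorem voice_entry (bgs : List (Int × Int)) (k d : Int) (i : Nat)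
    (hL : 0 < bgs.length) (hi : i < bgs.length) :
    (if PySem.Int.mod (k * d) (bgs.length : Int) == 0 then bgs
     else PySem.List.slice bgs (some (-(PySem.Int.mod (k * d) (bgs.length : Int)))) none ++
          PySem.List.slice bgs none (some (-(PySem.Int.mod (k * d) (bgs.length : Int))))).getD i (0, 0)
      = PySem.List.pyGetD bgs (PySem.Int.mod ((i : Int) - k * d) (bgs.length : Int)) (0, 0) := by
  have hLpos : (0 : Int) < (bgs.length : Int) := by exact_mod_cast hL
  set off := PySem.Int.mod (k * d) (bgs.length : Int) with hoffdef
  have hoffe : off = (k * d) % (bgs.length : Int) := PySem.Int.mod_eq_emod_of_pos hLpos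
  have hoff0 : 0 ≤ off := PySem.Int.mod_nonneg _ hLpos
  have hoffL : off < (bgs.length : Int) := PySem.Int.mod_lt _ hLpos
  have htgt : PySem.Int.mod ((i : Int) - k * d) (bgs.length : Int)
      = ((i : Int) - off) % (bgs.length : Int) := by
    rw [PySem.Int.mod_eq_emod_of_pos hLpos, hoffe]
    rw [Int.sub_emod ((i : Int)) (k * d), Int.sub_emod ((i : Int)) (k * d % (bgs.length : Int)),
        Int.emod_emod_of_dvd _ (dvd_refl _)]
  have hrange : 0 ≤ ((i : Int) - off) % (bgs.length : Int) ∧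
      ((i : Int) - off) % (bgs.length : Int) < (bgs.length : Int) :=
    ⟨Int.emod_nonneg _ (by omega), Int.emod_lt_of_pos _ hLpos⟩
  have hpy : PySem.List.pyGetD bgs (((i : Int) - off) % (bgs.length : Int)) (0, 0)
      = bgs.getD ((((i : Int) - off) % (bgs.length : Int)).toNat) (0, 0) := by
    rw [PySem.List.pyGetD_eq_getElem _ _ hrange.1 hrange.2,
        List.getD_eq_getElem?_getD, List.getElem?_eq_getElem (by omega)]
    rfl
  rw [htgt, hpy]
  by_cases hz : off = 0
  · have hemod2 : (((i : Int)) % (bgs.length : Int)).toNat = i := by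
      rw [Int.emod_eq_of_lt (by omega) (by omega)]
      omega
    simp [hz, hemod2]
  · rw [if_neg (by simpa using hz)]
    have hofftn : off = ((off.toNat : Nat) : Int) := by omega
    rw [hofftn, PySem.List.slice_from_neg_natCast bgs off.toNat (by omega),
        PySem.List.slice_to_neg_natCast bgs off.toNat (by omega)]
    exact rot_getD bgs off.toNat i (by omega) (by omega) hi

theorem slice_bigrams_eq (seq : List Int) (n_voices d : Int)
    (hn : 1 ≤ n_voices) :
    slice_bigrams seq n_voices d = slice_bigrams_alt seq n_voices d := by
  unfold slice_bigrams slice_bigrams_alt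
  dsimp only
  set bgs := cyclic_bigrams_port seq with hbgs
  have hlenb : bgs.length = seq.length := len_cyclic_bigrams seq
  rw [hlenb]
  by_cases hL0 : seq.length = 0
  · simp [hL0, PySem.List.pyRange_one_eq_nil]
  · rw [if_neg (by simp; exact fun h => hL0 (by simp [h]))]
    -- turn the three append-loops into maps
    simp only [PySem.List.foldl_append_singleton_eq_map, List.nil_append]
    set rot : Int → List (Int × Int) := fun k =>
      if PySem.Int.mod (k * d) (seq.length : Int) == 0 then bgs
      else PySem.List.slice bgs (some (-(PySem.Int.mod (k * d) (seq.length : Int)))) none ++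
           PySem.List.slice bgs none (some (-(PySem.Int.mod (k * d) (seq.length : Int)))) with hrot
    have hLpos : (0 : Int) < (seq.length : Int) := by
      have := Nat.pos_of_ne_zero hL0; exact_mod_cast this
    have hrotlen : ∀ k, (rot k).length = seq.length := by
      intro k
      rw [hrot]
      dsimp only
      by_cases hz : PySem.Int.mod (k * d) (seq.length : Int) = 0
      · simp [hz, hlenb]
      · have h0 : 0 ≤ PySem.Int.mod (k * d) (seq.length : Int) :=
          PySem.Int.mod_nonneg _ hLpos
        have hlt : PySem.Int.mod (k * d) (seq.length : Int) < (seq.length : Int) :=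
          PySem.Int.mod_lt _ hLpos
        rw [if_neg (by simpa using hz)]
        set off := PySem.Int.mod (k * d) (seq.length : Int) with hoffdef
        have hofftn : off = ((off.toNat : Nat) : Int) := by omega
        rw [hofftn, PySem.List.slice_from_neg_natCast bgs off.toNat (by omega),
            PySem.List.slice_to_neg_natCast bgs off.toNat (by omega)]
        simp [hlenb]
    have hvoices : (PySem.List.pyRange 0 n_voices 1).map rot
        = rot 0 :: (PySem.List.pyRange 1 n_voices 1).map rot := by
      rw [PySem.List.pyRange_one_cons (by omega)]
      simp
    rw [hvoices]
    simp only [zipStarCols]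
    have hmin : ((PySem.List.pyRange 1 n_voices 1).map rot).foldl
        (fun acc row => Nat.min acc row.length) (rot 0).length = seq.length := by
      rw [hrotlen 0]
      exact foldl_min_const _ _ (by
        intro r hr
        rcases List.mem_map.mp hr with ⟨kk, _, rfl⟩
        exact hrotlen kk)
    rw [hmin, ← hvoices]
    -- align the outer ranges
    rw [PySem.List.pyRange_one 0 (seq.length : Int)]
    simp only [sub_zero, Int.toNat_natCast, List.map_map]
    apply List.map_congr_left
    intro i hi
    have hi' : i < seq.length := List.mem_range.mp hi
    simp only [Function.comp, zero_add]
    apply List.map_congr_left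
    intro k hk
    simp only [Function.comp, hrot]
    rw [← hlenb]
    exact (voice_entry bgs k d i (by omega) (by omega)).symm

-- ===== VERDICT (by name: the statement is the Claim_ definition above) =====
theorem slice_bigrams_spec : Claim_equal_slice_bigrams := by
  intro seq n_voices d _ hpre
  unfold Spec_slice_bigrams
  exact slice_bigrams_eq seq n_voices d hpre.1
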